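-- pv_equiv track=rewrite | github.com/awaisnazir08/Problems-LeetCode | 2270-find-all-lonely-numbers-in-the-array/find-all-lonely-numbers-in-the-array.py | findLonely
-- ===== SOURCE A (Python) =====
-- from typing import List
--
-- def findLonely(nums: List[int]) -> List[int]:
--     map = {}
--     for num in nums:
--         if num not in map:
--             map[num] = 0
--         map[num] += 1
--
--     res = []
--     for num in nums:
--         if map[num] == 1:
--             if num - 1 not in map and num + 1 not in map:
--                 res.append(num)
--
--
--     return res
-- ===== SOURCE B (Python) =====
-- def findLonely(nums):
--     s = sorted(nums)
--     n = len(s)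
--     lonely = set()
--     for i in range(n):
--         if (i == 0 or s[i - 1] < s[i] - 1) and (i == n - 1 or s[i + 1] > s[i] + 1):
--             lonely.add(s[i])
--     return [num for num in nums if num in lonely]
-- ===== Notes on version B (the rewrite author's own statement) =====
-- stated objective: alternative
-- what changed: B sorts a copy of nums and detects lonely values by a single adjacent-neighbour scan of the sorted list (collecting them into a set, then filtering the original list to keep A's order), instead of A's counting dictionary with per-element count and neighbour lookups.
import Mathlib
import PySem

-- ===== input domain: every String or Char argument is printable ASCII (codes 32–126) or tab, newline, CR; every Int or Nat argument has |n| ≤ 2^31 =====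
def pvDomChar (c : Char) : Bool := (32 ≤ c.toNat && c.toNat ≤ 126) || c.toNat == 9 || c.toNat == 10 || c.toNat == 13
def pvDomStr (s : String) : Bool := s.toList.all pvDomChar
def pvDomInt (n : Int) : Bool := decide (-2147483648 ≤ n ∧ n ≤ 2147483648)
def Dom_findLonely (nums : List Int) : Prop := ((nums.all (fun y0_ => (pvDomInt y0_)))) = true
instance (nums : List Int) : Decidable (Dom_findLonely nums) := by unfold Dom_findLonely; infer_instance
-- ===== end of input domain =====

-- B replaces A's counting dictionary by sorting a copy of nums and scanning adjacent
-- neighbours of the sorted list once; the original list is then filtered through the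
-- collected set, so the output order matches A's (alternative decomposition, not faster).

-- ===== PORT A =====
def findLonely (nums : List Int) : List Int :=
  let m := nums.foldl (fun d num =>
    let d1 := if d.contains num then d else d.insert num (0 : Int)
    d1.insert num (d1.getD num 0 + 1)) PySem.Dict.empty
  nums.foldl (fun res num =>
    if m.getD num 0 == 1 then
      if !m.contains (num - 1) && !m.contains (num + 1) then res ++ [num] else res
    else res) []

-- ===== PORT B =====
def findLonely_alt (nums : List Int) : List Int :=
  let s := PySem.List.sorted nums (fun x => x) false
  let n : Int := s.length
  let lonely : PySem.Set Int := (PySem.List.pyRange 0 n 1).foldl (fun lon i =>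
    if (i == 0 || PySem.List.pyGetD s (i - 1) 0 < PySem.List.pyGetD s i 0 - 1) &&
       (i == n - 1 || PySem.List.pyGetD s (i + 1) 0 > PySem.List.pyGetD s i 0 + 1)
    then PySem.Set.add lon (PySem.List.pyGetD s i 0) else lon) PySem.Set.empty
  nums.filter (fun num => PySem.Set.contains lonely num)

-- ===== PRECONDITION & SPEC =====
def Spec_findLonely (nums : List Int) (out : List Int) : Prop := out = findLonely_alt nums
instance (nums : List Int) (out : List Int) : Decidable (Spec_findLonely nums out) := by unfold Spec_findLonely; infer_instance

-- ===== CLAIM (what is proved, stated in full; the proofs are below) =====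
def Claim_equal_findLonely : Prop := ∀ (nums : List Int), Dom_findLonely nums → Spec_findLonely nums (findLonely nums)

-- ===== LEMMAS AND PROOFS =====

lemma stepA_eq (d : PySem.Dict Int Int) (num : Int) :
    (let d1 := if d.contains num then d else d.insert num (0 : Int)
     d1.insert num (d1.getD num 0 + 1)) = d.insert num (d.getD num 0 + 1) := by
  by_cases h : d.contains num = true
  · simp [h]
  · simp only [h, Bool.false_eq_true, if_false]
    rw [PySem.Dict.getD_insert, if_pos rfl,
      PySem.Dict.getD_of_not_contains d 0 (by simpa using h),
      PySem.Dict.insert_insert_self]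

lemma count_ge_two (s : List Int) (x : Int) (j k : Nat) (hjk : j < k) (hk : k < s.length)
    (h1 : s[j]'(by omega) = x) (h2 : s[k] = x) : 2 ≤ s.count x := by
  have hsplit : s = s.take k ++ s.drop k := (List.take_append_drop k s).symm
  have hd : s.drop k = s[k] :: s.drop (k+1) := List.drop_eq_getElem_cons hk
  have hmem : x ∈ s.take k := by
    have : (s.take k)[j]'(by simp [List.length_take]; omega) = x := by
      simpa [List.getElem_take] using h1
    exact this ▸ List.getElem_mem _
  have h1' : 1 ≤ (s.take k).count x := List.count_pos_iff.mpr hmem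
  calc 2 ≤ (s.take k).count x + (s[k] :: s.drop (k+1)).count x := by
        simp [h2]; omega
    _ = s.count x := by rw [← hd, ← List.count_append, ← hsplit]

-- A as a filter
lemma findA_filter (nums : List Int) :
    (nums.foldl (fun res num =>
      if (PySem.Dict.counter nums).getD num 0 == 1 then
        if !(PySem.Dict.counter nums).contains (num - 1) && !(PySem.Dict.counter nums).contains (num + 1) then res ++ [num] else res
      else res) []) =
    nums.filter (fun num => ((PySem.Dict.counter nums).getD num 0 == 1) &&
       (!(PySem.Dict.counter nums).contains (num - 1) && !(PySem.Dict.counter nums).contains (num + 1))) := by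
  have := PySem.List.foldl_append_if_eq_filter
    (fun num => ((PySem.Dict.counter nums).getD num 0 == 1) &&
       (!(PySem.Dict.counter nums).contains (num - 1) && !(PySem.Dict.counter nums).contains (num + 1))) nums []
  rw [List.nil_append] at this
  rw [← this]
  apply PySem.List.foldl_congr_mem
  intro acc x hx
  split_ifs <;> simp_all

-- B-side set fold membership
lemma mem_foldl_add (l : List Int) (c : Int → Bool) (g : Int → Int) (s0 : PySem.Set Int) (x : Int) :
    (x ∈ l.foldl (fun lon i => if c i then PySem.Set.add lon (g i) else lon) s0) ↔
      x ∈ s0 ∨ ∃ i ∈ l, c i ∧ g i = x := by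
  induction l generalizing s0 with
  | nil => simp
  | cons a t ih =>
    simp only [List.foldl_cons]
    by_cases hc : c a = true
    · simp only [hc, if_true, ih, PySem.Set.mem_add, List.mem_cons]
      constructor
      · rintro (⟨h | h⟩ | ⟨i, hi, h1, h2⟩)
        · exact Or.inl h
        · exact Or.inr ⟨a, Or.inl rfl, hc, h.symm⟩
        · exact Or.inr ⟨i, Or.inr hi, h1, h2⟩
      · rintro (h | ⟨i, rfl | hi, h1, h2⟩)
        · exact Or.inl (Or.inl h)
        · exact Or.inl (Or.inr h2.symm)
        · exact Or.inr ⟨i, hi, h1, h2⟩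
    · simp only [hc, Bool.false_eq_true, if_false, ih, List.mem_cons]
      constructor
      · rintro (h | ⟨i, hi, h1, h2⟩)
        · exact Or.inl h
        · exact Or.inr ⟨i, Or.inr hi, h1, h2⟩
      · rintro (h | ⟨i, rfl | hi, h1, h2⟩)
        · exact Or.inl h
        · rw [h1] at hc; exact absurd rfl hc
        · exact Or.inr ⟨i, hi, h1, h2⟩

-- the heart: in a ≤-monotone list, the adjacent-gap condition at index j says exactly
-- that the value occurs once and has no value at distance 1
lemma lonely_char (s : List Int)
    (hmono : ∀ (p q : Nat) (hpq : p ≤ q) (hq : q < s.length), s[p]'(by omega) ≤ s[q]) (x : Int) :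
    (∃ j, j < s.length ∧
       ((j = 0 ∨ s.getD (j-1) 0 < s.getD j 0 - 1) ∧
        (j = s.length - 1 ∨ s.getD j 0 + 1 < s.getD (j+1) 0)) ∧ s.getD j 0 = x)
    ↔ (x ∈ s ∧ s.count x = 1 ∧ (x-1) ∉ s ∧ (x+1) ∉ s) := by
  constructor
  · rintro ⟨j, hj, ⟨hL, hR⟩, hx⟩
    rw [List.getD_eq_getElem s 0 hj] at hx
    have keyL : ∀ k (hk : k < j), s[k]'(by omega) < x - 1 := by
      intro k hk
      have hj0 : j ≠ 0 := by omega
      rcases hL with h | h; · exact absurd h hj0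
      rw [List.getD_eq_getElem s 0 (by omega : j - 1 < s.length),
          List.getD_eq_getElem s 0 hj, hx] at h
      exact lt_of_le_of_lt (hmono k (j-1) (by omega) (by omega)) h
    have keyR : ∀ k (hk1 : j < k) (hk2 : k < s.length), x + 1 < s[k] := by
      intro k hk1 hk2
      have hjn : j ≠ s.length - 1 := by omega
      rcases hR with h | h; · exact absurd h hjn
      rw [List.getD_eq_getElem s 0 (by omega : j + 1 < s.length),
          List.getD_eq_getElem s 0 hj, hx] at h
      exact lt_of_lt_of_le h (hmono (j+1) k (by omega) hk2)
    have hmem : x ∈ s := hx ▸ List.getElem_mem hj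
    have hnt : x ∉ s.take j := by
      intro hm
      obtain ⟨k, hk, he⟩ := List.mem_take_iff_getElem.mp hm
      have := keyL k (by omega)
      omega
    have hnd : x ∉ s.drop (j+1) := by
      intro hm
      obtain ⟨k, hk, he⟩ := List.mem_iff_getElem.mp hm
      rw [List.getElem_drop] at he
      have := keyR (j+1+k) (by omega) (by simp at hk; omega)
      omega
    have hsplit : s = s.take j ++ s[j] :: s.drop (j+1) := by
      rw [← List.drop_eq_getElem_cons hj, List.take_append_drop]
    refine ⟨hmem, ?_, ?_, ?_⟩
    · rw [hsplit, List.count_append, List.count_cons, hx]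
      rw [List.count_eq_zero.mpr hnt, List.count_eq_zero.mpr hnd]
      simp
    · intro hm
      obtain ⟨k, hk, he⟩ := List.mem_iff_getElem.mp hm
      rcases lt_trichotomy k j with h | rfl | h
      · have := keyL k h; omega
      · omega
      · have := keyR k h hk; omega
    · intro hm
      obtain ⟨k, hk, he⟩ := List.mem_iff_getElem.mp hm
      rcases lt_trichotomy k j with h | rfl | h
      · have := keyL k h; omega
      · omega
      · have := keyR k h hk; omega
  · rintro ⟨hmem, hcount, hm1, hp1⟩
    obtain ⟨j, hj, he⟩ := List.mem_iff_getElem.mp hmem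
    refine ⟨j, hj, ⟨?_, ?_⟩, by rw [List.getD_eq_getElem s 0 hj]; exact he⟩
    · by_cases h0 : j = 0
      · exact Or.inl h0
      · refine Or.inr ?_
        rw [List.getD_eq_getElem s 0 (by omega : j - 1 < s.length), List.getD_eq_getElem s 0 hj, he]
        have hle : s[j-1]'(by omega) ≤ x := he ▸ hmono (j-1) j (by omega) hj
        have hne : s[j-1]'(by omega) ≠ x := by
          intro hq
          have := count_ge_two s x (j-1) j (by omega) hj hq he
          omega
        have hne1 : s[j-1]'(by omega) ≠ x - 1 := by
          intro hq
          exact hm1 (hq ▸ List.getElem_mem (by omega))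
        omega
    · by_cases hn : j = s.length - 1
      · exact Or.inl hn
      · refine Or.inr ?_
        have hj1 : j + 1 < s.length := by omega
        rw [List.getD_eq_getElem s 0 hj1, List.getD_eq_getElem s 0 hj, he]
        have hle : x ≤ s[j+1] := he ▸ hmono j (j+1) (by omega) hj1
        have hne : s[j+1] ≠ x := by
          intro hq
          have := count_ge_two s x j (j+1) (by omega) hj1 he hq
          omega
        have hne1 : s[j+1] ≠ x + 1 := by
          intro hq
          exact hp1 (hq ▸ List.getElem_mem hj1)
        omega

lemma exists_bridge (s : List Int) (x : Int) :
    (∃ i ∈ PySem.List.pyRange 0 (s.length : Int) 1,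
       ((i == 0 || decide (PySem.List.pyGetD s (i - 1) 0 < PySem.List.pyGetD s i 0 - 1)) &&
        (i == (s.length : Int) - 1 || decide (PySem.List.pyGetD s (i + 1) 0 > PySem.List.pyGetD s i 0 + 1))) = true ∧
       PySem.List.pyGetD s i 0 = x)
    ↔ (∃ j, j < s.length ∧
       ((j = 0 ∨ s.getD (j-1) 0 < s.getD j 0 - 1) ∧
        (j = s.length - 1 ∨ s.getD j 0 + 1 < s.getD (j+1) 0)) ∧ s.getD j 0 = x) := by
  constructor
  · rintro ⟨i, hi, hc, hg⟩
    rw [PySem.List.mem_pyRange_one] at hi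
    obtain ⟨h0, h1⟩ := hi
    simp only [Bool.and_eq_true, Bool.or_eq_true, beq_iff_eq, decide_eq_true_eq] at hc
    obtain ⟨hcL, hcR⟩ := hc
    refine ⟨i.toNat, by omega, ⟨?_, ?_⟩, ?_⟩
    · by_cases hz : i = 0
      · exact Or.inl (by omega)
      · rcases hcL with h | h
        · exact absurd h hz
        · refine Or.inr ?_
          rw [PySem.List.pyGetD_eq_getElem s 0 (by omega) (by omega),
              PySem.List.pyGetD_eq_getElem s 0 h0 h1] at h
          rw [List.getD_eq_getElem s 0 (by omega : i.toNat - 1 < s.length),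
              List.getD_eq_getElem s 0 (by omega : i.toNat < s.length)]
          have e1 : (i - 1).toNat = i.toNat - 1 := by omega
          simp only [e1] at h
          exact h
    · by_cases hlast : i = (s.length : Int) - 1
      · exact Or.inl (by omega)
      · rcases hcR with h | h
        · exact absurd h hlast
        · refine Or.inr ?_
          rw [PySem.List.pyGetD_eq_getElem s 0 (by omega) (by omega),
              PySem.List.pyGetD_eq_getElem s 0 h0 h1] at h
          rw [List.getD_eq_getElem s 0 (by omega : i.toNat + 1 < s.length),
              List.getD_eq_getElem s 0 (by omega : i.toNat < s.length)]
          have e1 : (i + 1).toNat = i.toNat + 1 := by omega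
          simp only [e1] at h
          exact h
    · rw [PySem.List.pyGetD_eq_getElem s 0 h0 h1] at hg
      rw [List.getD_eq_getElem s 0 (by omega : i.toNat < s.length)]
      exact hg
  · rintro ⟨j, hj, ⟨hL, hR⟩, hg⟩
    have ej : ((j : Int)).toNat = j := Int.toNat_natCast j
    refine ⟨(j : Int), PySem.List.mem_pyRange_one.mpr ⟨by omega, by omega⟩, ?_, ?_⟩
    · simp only [Bool.and_eq_true, Bool.or_eq_true, beq_iff_eq, decide_eq_true_eq]
      constructor
      · by_cases hz : j = 0
        · exact Or.inl (by omega)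
        · rcases hL with h | h
          · exact absurd h hz
          · refine Or.inr ?_
            rw [PySem.List.pyGetD_eq_getElem s 0 (by omega) (by omega),
                PySem.List.pyGetD_eq_getElem s 0 (by omega) (by omega)]
            rw [List.getD_eq_getElem s 0 (by omega : j - 1 < s.length),
                List.getD_eq_getElem s 0 (by omega : j < s.length)] at h
            have e1 : ((j : Int) - 1).toNat = j - 1 := by omega
            simp only [e1, ej]
            exact h
      · by_cases hlast : j = s.length - 1
        · exact Or.inl (by omega)
        · rcases hR with h | h
          · exact absurd h hlast
          · refine Or.inr ?_
            rw [PySem.List.pyGetD_eq_getElem s 0 (by omega) (by omega),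
                PySem.List.pyGetD_eq_getElem s 0 (by omega) (by omega)]
            rw [List.getD_eq_getElem s 0 (by omega : j + 1 < s.length),
                List.getD_eq_getElem s 0 (by omega : j < s.length)] at h
            have e1 : ((j : Int) + 1).toNat = j + 1 := by omega
            simp only [e1, ej]
            exact h
    · rw [PySem.List.pyGetD_eq_getElem s 0 (by omega) (by omega)]
      rw [List.getD_eq_getElem s 0 (by omega : j < s.length)] at hg
      simp only [ej]
      exact hg

lemma findLonely_eq_alt (nums : List Int) : findLonely nums = findLonely_alt nums := by
  have hfold : nums.foldl (fun d num =>
      let d1 := if d.contains num then d else d.insert num (0 : Int)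
      d1.insert num (d1.getD num 0 + 1)) PySem.Dict.empty = PySem.Dict.counter nums := by
    rw [← PySem.Dict.foldl_insert_getD_add_one_eq_counter]
    apply PySem.List.foldl_congr_mem
    intro acc x _
    exact stepA_eq acc x
  simp only [findLonely, hfold, findA_filter, findLonely_alt]
  apply List.filter_congr
  intro x hx
  rw [Bool.eq_iff_iff]
  set s := PySem.List.sorted nums (fun x => x) false with hs
  have hperm : s.Perm nums := PySem.List.sorted_perm nums _ false
  have hmono := fun p q hpq hq => PySem.List.sorted_id_getElem_mono nums (p := p) (q := q) hpq hq
  constructor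
  · intro hA
    simp only [Bool.and_eq_true, beq_iff_eq, Bool.not_eq_eq_eq_not, Bool.not_true,
      PySem.Dict.getD_counter, PySem.Dict.contains_counter, List.contains_eq_mem,
      decide_eq_false_iff_not] at hA
    rw [PySem.Set.contains_iff, mem_foldl_add, exists_bridge, lonely_char s hmono]
    refine Or.inr ⟨hperm.mem_iff.mpr hx, ?_, ?_, ?_⟩
    · rw [hperm.count_eq]; omega
    · rw [hperm.mem_iff]; exact hA.2.1
    · rw [hperm.mem_iff]; exact hA.2.2
  · intro hB
    rw [PySem.Set.contains_iff, mem_foldl_add, exists_bridge, lonely_char s hmono] at hB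
    rcases hB with hB | hB
    · simp [PySem.Set.empty] at hB
    obtain ⟨hm, hc, h1, h2⟩ := hB
    simp only [Bool.and_eq_true, beq_iff_eq, Bool.not_eq_eq_eq_not, Bool.not_true,
      PySem.Dict.getD_counter, PySem.Dict.contains_counter, List.contains_eq_mem,
      decide_eq_false_iff_not]
    rw [hperm.count_eq] at hc
    refine ⟨by omega, ?_, ?_⟩
    · rw [← hperm.mem_iff]; exact h1
    · rw [← hperm.mem_iff]; exact h2

-- ===== VERDICT (by name: the statement is the Claim_ definition above) =====
theorem findLonely_spec : Claim_equal_findLonely := by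
  intro nums _
  unfold Spec_findLonely
  exact findLonely_eq_alt nums
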